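-- pv_equiv track=rewrite | github.com/Bunbread/HWChecker2 | functions.py | generate_lcm_steps
-- ===== SOURCE A (Python) =====
-- def get_prime_factors(n):
--     factors = []
--     d = 2
--     temp_n = n
--     while d * d <= temp_n:
--         if temp_n % d == 0:
--             factors.append(d)
--             temp_n //= d
--         else:
--             d += 1
--     if temp_n > 1:
--         factors.append(temp_n)
--     return factors
--
-- def generate_lcm_steps(numbers):
--     steps = []
--
--     steps.append(f"**โจทย์:** หา ค.ร.น. ของ {', '.join(str(num) for num in numbers)}")
--
--     all_prime_factors = {}
--     for num in numbers:
--         factors = get_prime_factors(num)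
--         all_prime_factors[num] = factors
--         steps.append(f"- {num} = {' x '.join(str(f) for f in factors)}")
--
--     max_prime_powers = {}
--     for num, factors in all_prime_factors.items():
--         for factor in factors:
--             count = factors.count(factor)
--             if factor not in max_prime_powers or count > max_prime_powers[factor]:
--                 max_prime_powers[factor] = count
--
--     lcm_components = []
--     for prime, count in max_prime_powers.items():
--         component = f"{prime}^{count}" if count > 1 else str(prime)
--         lcm_components.append(component)
--
--
--     return "\n".join(steps)
-- ===== SOURCE B (Python) =====
-- def _smallest_divisor(n):
--     d = 2
--     while d * d <= n:
--         if n % d == 0: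
--             return d
--         d += 1
--     return None
--
-- def get_prime_factors(n):
--     d = _smallest_divisor(n)
--     if d is None:
--         return [n] if n > 1 else []
--     return [d] + get_prime_factors(n // d)
--
-- def generate_lcm_steps(numbers):
--     lines = [f"**โจทย์:** หา ค.ร.น. ของ {', '.join(str(n) for n in numbers)}"]
--     lines += [f"- {n} = {' x '.join(str(f) for f in get_prime_factors(n))}" for n in numbers]
--     return "\n".join(lines)
-- ===== Notes on version B (the rewrite author's own statement) =====
-- stated objective: simpler
-- what changed: get_prime_factors is rewritten as a recursion that extracts the smallest divisor (found by a fresh scan from 2) and recurses on the cofactor instead of A's single while loop with a persistent trial divisor, the dead max_prime_powers/lcm_components block is dropped, and the step lines are built by a comprehension instead of an accumulating loop with a side dict.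
import Mathlib
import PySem

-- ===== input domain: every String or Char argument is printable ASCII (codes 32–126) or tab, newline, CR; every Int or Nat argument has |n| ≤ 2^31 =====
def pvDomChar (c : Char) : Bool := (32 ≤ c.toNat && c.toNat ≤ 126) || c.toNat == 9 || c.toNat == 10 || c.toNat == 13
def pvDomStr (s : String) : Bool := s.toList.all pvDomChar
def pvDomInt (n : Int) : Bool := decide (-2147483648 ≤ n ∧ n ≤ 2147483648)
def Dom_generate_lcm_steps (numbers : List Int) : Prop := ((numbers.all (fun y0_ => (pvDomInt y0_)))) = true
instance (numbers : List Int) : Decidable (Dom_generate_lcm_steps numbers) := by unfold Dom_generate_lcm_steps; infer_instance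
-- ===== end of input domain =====

-- B drops A's dead max_prime_powers/lcm_components block (it never reaches the output), factors by
-- recursive smallest-divisor extraction instead of A's persistent-divisor while loop, and builds the
-- step lines by a comprehension; objective: simpler, same output byte for byte.

-- ===== PORT A =====
-- A's 'while d*d <= temp_n' loop over the state (d, temp_n, factors).  The Nat 'fuel' argument is
-- only a totality guard (structural recursion); get_prime_factors supplies enough fuel that the
-- 0-case is never reached (each iteration either divides temp_n by d ≥ 2 or increments d ≤ temp_n).
def pyA_loop : Nat → Nat → Int → List Int → List Int
  | 0, _, _, acc => acc
  | fuel + 1, d, n, acc =>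
    if (d : Int) * d ≤ n then
      if PySem.Int.mod n d = 0 then
        pyA_loop fuel d (PySem.Int.floordiv n d) (acc ++ [(d : Int)])
      else
        pyA_loop fuel (d + 1) n acc
    else
      if n > 1 then acc ++ [n] else acc

def get_prime_factors (n : Int) : List Int :=
  pyA_loop (2 * n.toNat + 1) 2 n []

def generate_lcm_steps (numbers : List Int) : String :=
  let steps : List String :=
    ["**โจทย์:** หา ค.ร.น. ของ " ++ PySem.Str.join ", " (numbers.map PySem.Int.toStr)]
  let st := numbers.foldl
    (fun (st : PySem.Dict Int (List Int) × List String) num =>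
      let factors := get_prime_factors num
      (st.1.insert num factors,
       st.2 ++ ["- " ++ PySem.Int.toStr num ++ " = " ++
                PySem.Str.join " x " (factors.map PySem.Int.toStr)]))
    (PySem.Dict.empty, steps)
  let all_prime_factors := st.1
  let steps := st.2
  let max_prime_powers := all_prime_factors.items.foldl
    (fun (mpp : PySem.Dict Int Int) nf =>
      nf.2.foldl
        (fun (mpp : PySem.Dict Int Int) factor =>
          let count : Int := PySem.List.count nf.2 factor
          if mpp.contains factor = false ∨ count > mpp.getD factor 0 then
            mpp.insert factor count
          else mpp)
        mpp)
    PySem.Dict.empty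
  let _lcm_components := max_prime_powers.items.foldl
    (fun (acc : List String) pc =>
      acc ++ [if pc.2 > 1 then PySem.Int.toStr pc.1 ++ "^" ++ PySem.Int.toStr pc.2
              else PySem.Int.toStr pc.1])
    []
  PySem.Str.join "\n" steps

-- ===== PORT B =====
-- Source B's _smallest_divisor scan (d = 2, 3, …); fuel is again only a structural totality guard,
-- n.toNat + 1 is enough since the scan stops once d*d > n, in particular once d > n.
def smallestDivisor_loop : Nat → Int → Nat → Option Nat
  | 0, _, _ => none
  | fuel + 1, n, d =>
    if (d : Int) * d ≤ n then
      if PySem.Int.mod n d = 0 then some d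
      else smallestDivisor_loop fuel n (d + 1)
    else none

def smallestDivisor (n : Int) : Option Nat :=
  smallestDivisor_loop (n.toNat + 1) n 2

-- Source B's recursive get_prime_factors; the fuel guard is sufficient because the cofactor shrinks.
def factB_loop : Nat → Int → List Int
  | 0, _ => []
  | fuel + 1, n =>
    match smallestDivisor n with
    | none => if n > 1 then [n] else []
    | some d => [(d : Int)] ++ factB_loop fuel (PySem.Int.floordiv n d)

def get_prime_factors_alt (n : Int) : List Int :=
  factB_loop (n.toNat + 1) n

def generate_lcm_steps_alt (numbers : List Int) : String :=
  let lines : List String :=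
    ["**โจทย์:** หา ค.ร.น. ของ " ++ PySem.Str.join ", " (numbers.map PySem.Int.toStr)]
  let lines := lines ++ numbers.map (fun n =>
    "- " ++ PySem.Int.toStr n ++ " = " ++
    PySem.Str.join " x " ((get_prime_factors_alt n).map PySem.Int.toStr))
  PySem.Str.join "\n" lines

-- ===== PRECONDITION & SPEC =====
def Spec_generate_lcm_steps (numbers : List Int) (out : String) : Prop := out = generate_lcm_steps_alt numbers
instance (numbers : List Int) (out : String) : Decidable (Spec_generate_lcm_steps numbers out) := by unfold Spec_generate_lcm_steps; infer_instance

-- ===== CLAIM (what is proved, stated in full; the proofs are below) =====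
def Claim_equal_generate_lcm_steps : Prop := ∀ (numbers : List Int), Dom_generate_lcm_steps numbers → Spec_generate_lcm_steps numbers (generate_lcm_steps numbers)

-- ===== LEMMAS AND PROOFS =====

theorem pv_d_le (n : Int) (d : Nat) (hd : 2 ≤ d) (hg : (d : Int) * d ≤ n) : d ≤ n.toNat := by
  have h1 : (1 : Int) ≤ (d : Int) := by exact_mod_cast (by omega : 1 ≤ d)
  have h2 : (d : Int) ≤ (d : Int) * d := le_mul_of_one_le_left (by positivity) h1
  omega

theorem pv_toNat_div (n : Int) (d : Nat) (hd : 2 ≤ d) (hg : (d : Int) * d ≤ n) :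
    (PySem.Int.floordiv n (d : Int)).toNat = n.toNat / d := by
  have h2 : (2 : Int) ≤ (d : Int) := by exact_mod_cast hd
  have h44 : (2 : Int) * 2 ≤ (d : Int) * d := mul_le_mul h2 h2 (by norm_num) (by positivity)
  have h4 : (4 : Int) ≤ n := by linarith
  have hcast : ((n.toNat : Nat) : Int) = n := Int.toNat_of_nonneg (by linarith)
  calc (PySem.Int.floordiv n (d : Int)).toNat
      = (PySem.Int.floordiv ((n.toNat : Nat) : Int) (d : Int)).toNat := by rw [hcast]
    _ = (((n.toNat / d : Nat) : Int)).toNat := by rw [PySem.Int.floordiv_natCast]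
    _ = n.toNat / d := Int.toNat_natCast _

theorem pv_div_lt (n : Int) (d : Nat) (hd : 2 ≤ d) (hg : (d : Int) * d ≤ n) :
    (PySem.Int.floordiv n (d : Int)).toNat < n.toNat := by
  rw [pv_toNat_div n d hd hg]
  have h4 : 4 ≤ n.toNat := by
    have h2 : (2 : Int) ≤ (d : Int) := by exact_mod_cast hd
    have h44 : (2 : Int) * 2 ≤ (d : Int) * d := mul_le_mul h2 h2 (by norm_num) (by positivity)
    omega
  exact Nat.div_lt_self (by omega) (by omega)

theorem pv_div_le2 (n : Int) (d : Nat) (hd : 2 ≤ d) (hg : (d : Int) * d ≤ n) :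
    2 * (PySem.Int.floordiv n (d : Int)).toNat ≤ n.toNat := by
  rw [pv_toNat_div n d hd hg]
  have := Nat.div_le_div_left (a := n.toNat) hd (by norm_num)
  omega

-- any 'some' the (possibly truncated) scan reports is a genuine smallest divisor from d on
theorem smallestDivisor_loop_some (fuel : Nat) (n : Int) (d p : Nat) (hd : 2 ≤ d)
    (h : smallestDivisor_loop fuel n d = some p) :
    2 ≤ p ∧ (p : Int) * p ≤ n ∧ PySem.Int.mod n p = 0 ∧ d ≤ p ∧
      ∀ k : Nat, d ≤ k → k < p → PySem.Int.mod n k ≠ 0 := by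
  induction fuel generalizing d with
  | zero => simp [smallestDivisor_loop] at h
  | succ fuel ih =>
    rw [smallestDivisor_loop] at h
    split_ifs at h with hg hm
    · cases h
      exact ⟨hd, hg, hm, le_rfl, fun k hk1 hk2 _ => by omega⟩
    · obtain ⟨h1, h2, h3, h4, h5⟩ := ih (d + 1) (by omega) h
      refine ⟨h1, h2, h3, by omega, fun k hk1 hk2 => ?_⟩
      rcases (by omega : d = k ∨ d + 1 ≤ k) with rfl | hlt
      · exact hm
      · exact h5 k hlt hk2

-- completeness of the scan: a smallest divisor from d on is found, fuel permitting
theorem smallestDivisor_loop_eq_some (fuel : Nat) (n : Int) (d p : Nat) (hd : 2 ≤ d)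
    (hf : n.toNat + 2 - d ≤ fuel)
    (hdp : d ≤ p) (hnd : ∀ k : Nat, d ≤ k → k < p → PySem.Int.mod n k ≠ 0)
    (hle : (p : Int) * p ≤ n) (hm : PySem.Int.mod n p = 0) :
    smallestDivisor_loop fuel n d = some p := by
  induction fuel generalizing d with
  | zero =>
    exfalso
    have := pv_d_le n p (by omega) hle
    omega
  | succ fuel ih =>
    rw [smallestDivisor_loop]
    split_ifs with hg hm'
    · congr 1
      by_contra hne
      exact hnd d le_rfl (lt_of_le_of_ne hdp hne) hm'
    · have hne : d ≠ p := fun h => hm' (h ▸ hm)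
      have hdn := pv_d_le n d hd hg
      exact ih (d + 1) (by omega) (by omega) (by omega)
        (fun k hk1 hk2 => hnd k (by omega) hk2)
    · exfalso
      apply hg
      refine le_trans ?_ hle
      have hdk : (d : Int) ≤ (p : Int) := by exact_mod_cast hdp
      have h0 : (0 : Int) ≤ (d : Int) := by positivity
      exact mul_le_mul hdk hdk h0 (by linarith)

-- B's recursion is fuel-irrelevant once the fuel exceeds n
theorem factB_loop_fuel (fuel fuel' : Nat) (n : Int)
    (hf : n.toNat < fuel) (hf' : n.toNat < fuel') :
    factB_loop fuel n = factB_loop fuel' n := by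
  induction fuel generalizing fuel' n with
  | zero => omega
  | succ fuel ih =>
    obtain ⟨f', rfl⟩ : ∃ f', fuel' = f' + 1 := ⟨fuel' - 1, by omega⟩
    rw [factB_loop, factB_loop]
    rcases hs : smallestDivisor n with _ | d
    · rfl
    · obtain ⟨h2, hle, -, -, -⟩ := smallestDivisor_loop_some _ n 2 d (by omega) hs
      have hlt := pv_div_lt n d h2 hle
      show [(d : Int)] ++ factB_loop fuel (PySem.Int.floordiv n (d : Int))
          = [(d : Int)] ++ factB_loop f' (PySem.Int.floordiv n (d : Int))
      rw [ih f' (PySem.Int.floordiv n (d : Int)) (by omega) (by omega)]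

-- one-step unfoldings of B's recursion
theorem get_prime_factors_alt_none (n : Int) (h : smallestDivisor n = none) :
    get_prime_factors_alt n = if n > 1 then [n] else [] := by
  rw [get_prime_factors_alt, factB_loop]
  simp [h]

theorem get_prime_factors_alt_some (n : Int) (d : Nat) (h : smallestDivisor n = some d) :
    get_prime_factors_alt n =
      [(d : Int)] ++ get_prime_factors_alt (PySem.Int.floordiv n d) := by
  obtain ⟨h2, hle, -, -, -⟩ := smallestDivisor_loop_some _ n 2 d (by omega) h
  have hlt := pv_div_lt n d h2 hle
  rw [get_prime_factors_alt, factB_loop]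
  simp only [h]
  rw [get_prime_factors_alt,
    factB_loop_fuel n.toNat ((PySem.Int.floordiv n (d : Int)).toNat + 1) _ (by omega) (by omega)]

-- the scan finds nothing once A's loop guard has failed with no divisor below d
theorem smallestDivisor_none_of (n : Int) (d : Nat) (hd : 2 ≤ d)
    (hg : ¬ ((d : Int) * d ≤ n))
    (hnd : ∀ k : Nat, 2 ≤ k → k < d → PySem.Int.mod n k ≠ 0) :
    smallestDivisor n = none := by
  rcases ho : smallestDivisor n with _ | p
  · rfl
  · exfalso
    obtain ⟨hp2, hple, hpm, -, -⟩ := smallestDivisor_loop_some _ n 2 p (by omega) ho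
    by_cases hpd : p < d
    · exact hnd p hp2 hpd hpm
    · apply hg
      refine le_trans ?_ hple
      have hdk : (d : Int) ≤ (p : Int) := by exact_mod_cast (by omega : d ≤ p)
      have h0 : (0 : Int) ≤ (d : Int) := by positivity
      exact mul_le_mul hdk hdk h0 (by linarith)

-- A's loop equals B's recursion, given no divisor of n below the current d and enough fuel
theorem pyA_loop_eq (fuel : Nat) (d : Nat) (n : Int) (acc : List Int) (hd : 2 ≤ d)
    (hf : 2 * n.toNat + 2 - d < fuel)
    (hnd : ∀ k : Nat, 2 ≤ k → k < d → PySem.Int.mod n k ≠ 0) :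
    pyA_loop fuel d n acc = acc ++ get_prime_factors_alt n := by
  induction fuel generalizing d n acc with
  | zero => omega
  | succ fuel ih =>
    rw [pyA_loop]
    split_ifs with hg hm hn1
    · -- d*d ≤ n and d divides n: the scan finds exactly d
      have hsd : smallestDivisor n = some d :=
        smallestDivisor_loop_eq_some _ n 2 d (by omega) (by omega) hd
          (fun k hk1 hk2 => hnd k hk1 hk2) hg hm
      have h0 : (0 : Int) < (d : Int) := by exact_mod_cast (by omega : 0 < d)
      have hdvd : (d : Int) ∣ n := (PySem.Int.mod_eq_zero_iff_dvd n d).mp hm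
      have hdn := pv_d_le n d hd hg
      have hlt := pv_div_lt n d hd hg
      have hle2 := pv_div_le2 n d hd hg
      have h4 : 4 ≤ n.toNat := by
        have h2 : (2 : Int) ≤ (d : Int) := by exact_mod_cast hd
        have h44 : (2 : Int) * 2 ≤ (d : Int) * d := mul_le_mul h2 h2 (by norm_num) (by positivity)
        omega
      have hrec := ih d (PySem.Int.floordiv n d) (acc ++ [(d : Int)]) hd (by omega)
        (fun k hk1 hk2 hmk => by
          have hkdvd : (k : Int) ∣ PySem.Int.floordiv n d :=
            (PySem.Int.mod_eq_zero_iff_dvd _ k).mp hmk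
          have hkn : (k : Int) ∣ n := by
            rw [PySem.Int.floordiv_eq_ediv_of_pos h0] at hkdvd
            have hc := Int.ediv_mul_cancel hdvd
            exact Dvd.dvd.trans hkdvd ⟨(d : Int), hc.symm⟩
          exact hnd k hk1 hk2 ((PySem.Int.mod_eq_zero_iff_dvd n k).mpr hkn))
      rw [hrec, get_prime_factors_alt_some n d hsd]
      simp
    · -- d*d ≤ n, d does not divide: advance d
      have hdn := pv_d_le n d hd hg
      exact ih (d + 1) n acc (by omega) (by omega)
        (fun k hk1 hk2 => by
          rcases (by omega : k < d ∨ k = d) with h | rfl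
          · exact hnd k hk1 h
          · exact hm)
    · -- d*d > n, n > 1
      rw [get_prime_factors_alt_none n (smallestDivisor_none_of n d hd hg hnd), if_pos hn1]
    · -- d*d > n, n ≤ 1
      rw [get_prime_factors_alt_none n (smallestDivisor_none_of n d hd hg hnd), if_neg hn1]
      simp

theorem get_prime_factors_eq (n : Int) : get_prime_factors n = get_prime_factors_alt n := by
  rw [get_prime_factors,
    pyA_loop_eq (2 * n.toNat + 1) 2 n [] (by omega) (by omega) (fun k hk1 hk2 _ => by omega)]
  simp

-- A's steps-building fold (which also carries the dict) produces header ++ one line per number.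
theorem foldl_steps (numbers : List Int) (d0 : PySem.Dict Int (List Int)) (s0 : List String) :
    (numbers.foldl
      (fun (st : PySem.Dict Int (List Int) × List String) num =>
        let factors := get_prime_factors num
        (st.1.insert num factors,
         st.2 ++ ["- " ++ PySem.Int.toStr num ++ " = " ++
                  PySem.Str.join " x " (factors.map PySem.Int.toStr)]))
      (d0, s0)).2
    = s0 ++ numbers.map (fun n =>
        "- " ++ PySem.Int.toStr n ++ " = " ++
        PySem.Str.join " x " ((get_prime_factors_alt n).map PySem.Int.toStr)) := by
  induction numbers generalizing d0 s0 with
  | nil => simp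
  | cons x xs ih =>
    simp only [List.foldl_cons]
    rw [ih]
    simp [get_prime_factors_eq]

-- ===== VERDICT (by name: the statement is the Claim_ definition above) =====
theorem generate_lcm_steps_spec : Claim_equal_generate_lcm_steps := by
  intro numbers _
  unfold Spec_generate_lcm_steps generate_lcm_steps generate_lcm_steps_alt
  simp only [foldl_steps]
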